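-- pv_equiv track=rewrite | github.com/super30admin/Binary-Search-3 | Problem3.py | OptimizedAir1
-- ===== SOURCE A (Python) =====
-- def OptimizedAir1(maxTravelDist, forwardRouteList, returnRouteList):
-- 	# Brute Force Way
-- 	# Using more space for storing all the differences
-- 	mapDistance = dict()
-- 	for i in forwardRouteList:
-- 		if i[1] > maxTravelDist:
-- 			continue
-- 		for j in returnRouteList:
-- 			if j[1] > maxTravelDist - i[1]:
-- 				continue
-- 			totalDist = maxTravelDist - (i[1] + j[1])
-- 			if totalDist not in mapDistance:
-- 				mapDistance[totalDist] = []
-- 			mapDistance[totalDist].append((i[0], j[0]))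
-- 	sortedKeys = sorted(list(mapDistance.keys()))
-- 	for i in sortedKeys:
-- 		if i < 0:
-- 			continue
-- 		return mapDistance[i]
-- ===== SOURCE B (Python) =====
-- def OptimizedAir1(maxTravelDist, forwardRouteList, returnRouteList):
--     # Two-pass, no dict and no sort: first find the best (largest) achievable
--     # total distance <= maxTravelDist, then collect the pairs that reach it.
--     best = None
--     for f in forwardRouteList:
--         for r in returnRouteList:
--             s = f[1] + r[1]
--             if f[1] <= maxTravelDist and s <= maxTravelDist:
--                 if best is None or best < s:
--                     best = s
--     if best is None:
--         return None
--     return [(f[0], r[0]) for f in forwardRouteList for r in returnRouteList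
--             if f[1] <= maxTravelDist and f[1] + r[1] == best]
-- ===== Notes on version B (the rewrite author's own statement) =====
-- stated objective: alternative
-- what changed: B replaces A's dict-of-buckets-keyed-by-remainder plus key sort with two plain passes: a running maximum finds the best achievable total distance, then a comprehension collects the pairs attaining it; no dict and no sorting.
import Mathlib
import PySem

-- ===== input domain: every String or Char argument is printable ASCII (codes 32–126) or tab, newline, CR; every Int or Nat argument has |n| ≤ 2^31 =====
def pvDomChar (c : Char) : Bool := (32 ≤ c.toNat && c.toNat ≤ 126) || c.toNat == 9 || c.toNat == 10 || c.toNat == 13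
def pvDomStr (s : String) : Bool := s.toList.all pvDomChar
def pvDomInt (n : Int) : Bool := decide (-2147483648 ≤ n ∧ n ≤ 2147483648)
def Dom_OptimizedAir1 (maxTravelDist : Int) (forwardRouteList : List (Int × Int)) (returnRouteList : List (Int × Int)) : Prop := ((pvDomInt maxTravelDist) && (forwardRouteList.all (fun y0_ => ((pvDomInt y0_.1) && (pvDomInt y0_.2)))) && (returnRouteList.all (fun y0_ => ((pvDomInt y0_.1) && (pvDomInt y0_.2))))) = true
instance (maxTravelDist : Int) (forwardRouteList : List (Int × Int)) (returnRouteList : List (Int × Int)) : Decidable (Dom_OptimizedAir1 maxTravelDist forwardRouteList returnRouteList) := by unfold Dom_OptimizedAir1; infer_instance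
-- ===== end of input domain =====

-- B replaces A's remainder-keyed dict of buckets plus key sort with two plain passes
-- (running max of the achievable total, then a comprehension gathering the pairs): alternative decomposition.


-- ===== PORT A =====
-- A's trailing loop 'for i in sortedKeys: if i < 0: continue; return mapDistance[i]'.
-- 'mapDistance[i]' is rendered by getD []: every element of sortedKeys is a key of the dict, so exact.
def pvFirstBucket (d : PySem.Dict Int (List (Int × Int))) : List Int → Option (List (Int × Int))
  | [] => none
  | k :: ks => if k < 0 then pvFirstBucket d ks else some (d.getD k [])

def OptimizedAir1 (maxTravelDist : Int) (forwardRouteList : List (Int × Int)) (returnRouteList : List (Int × Int)) : Option (List (Int × Int)) :=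
  let mapDistance : PySem.Dict Int (List (Int × Int)) :=
    forwardRouteList.foldl (fun d i =>
      if i.2 > maxTravelDist then d else
      returnRouteList.foldl (fun d j =>
        if j.2 > maxTravelDist - i.2 then d else
        let totalDist := maxTravelDist - (i.2 + j.2)
        let d := if d.contains totalDist = false then d.insert totalDist [] else d
        d.modify totalDist [] (fun l => l ++ [(i.1, j.1)])) d) PySem.Dict.empty
  let sortedKeys := PySem.List.sorted mapDistance.keys (fun x => x) false
  pvFirstBucket mapDistance sortedKeys

-- ===== PORT B =====
def OptimizedAir1_alt (maxTravelDist : Int) (forwardRouteList : List (Int × Int)) (returnRouteList : List (Int × Int)) : Option (List (Int × Int)) :=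
  let best : Option Int :=
    forwardRouteList.foldl (fun b f =>
      returnRouteList.foldl (fun b r =>
        let s := f.2 + r.2
        if f.2 ≤ maxTravelDist ∧ s ≤ maxTravelDist then
          if b = none ∨ b.getD 0 < s then some s else b
        else b) b) none
  match best with
  | none => none
  | some s => some (forwardRouteList.flatMap (fun f =>
      (returnRouteList.filter (fun r => decide (f.2 ≤ maxTravelDist ∧ f.2 + r.2 = s))).map (fun r => (f.1, r.1))))

-- ===== PRECONDITION & SPEC =====
def Spec_OptimizedAir1 (maxTravelDist : Int) (forwardRouteList : List (Int × Int)) (returnRouteList : List (Int × Int)) (out : Option (List (Int × Int))) : Prop := out = OptimizedAir1_alt maxTravelDist forwardRouteList returnRouteList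
instance (maxTravelDist : Int) (forwardRouteList : List (Int × Int)) (returnRouteList : List (Int × Int)) (out : Option (List (Int × Int))) : Decidable (Spec_OptimizedAir1 maxTravelDist forwardRouteList returnRouteList out) := by unfold Spec_OptimizedAir1; infer_instance

-- ===== CLAIM (what is proved, stated in full; the proofs are below) =====
def Claim_equal_OptimizedAir1 : Prop := ∀ (maxTravelDist : Int) (forwardRouteList : List (Int × Int)) (returnRouteList : List (Int × Int)), Dom_OptimizedAir1 maxTravelDist forwardRouteList returnRouteList → Spec_OptimizedAir1 maxTravelDist forwardRouteList returnRouteList (OptimizedAir1 maxTravelDist forwardRouteList returnRouteList)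

-- ===== LEMMAS AND PROOFS =====

-- The qualifying (remainder, (forwardId, returnId)) pairs, in A's iteration order.
def pvPairs (m : Int) (F R : List (Int × Int)) : List (Int × (Int × Int)) :=
  F.flatMap (fun f => if f.2 ≤ m then
    (R.filter (fun r => decide (r.2 ≤ m - f.2))).map (fun r => (m - (f.2 + r.2), (f.1, r.1))) else [])

-- A's inner-loop body ('insert [] if absent, then append') collapses to a single modify.
theorem pv_step_eq_modify (d : PySem.Dict Int (List (Int × Int))) (t : Int) (p : Int × Int) :
    ((if d.contains t = false then d.insert t [] else d).modify t [] (fun l => l ++ [p]))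
      = d.modify t [] (fun l => l ++ [p]) := by
  by_cases h : d.contains t = false
  · rw [if_pos h]
    unfold PySem.Dict.modify
    rw [PySem.Dict.getD_insert_self, PySem.Dict.insert_insert_self,
      PySem.Dict.getD_of_not_contains d [] h]
  · rw [if_neg h]

-- 'if c: continue' shape: a fold skipping on c is a fold over the complement filter.
theorem pv_foldl_skip_if {α δ : Type} (p : α → Prop) [DecidablePred p] (f : δ → α → δ)
    (l : List α) (init : δ) :
    l.foldl (fun acc x => if p x then acc else f acc x) init
      = (l.filter (fun x => decide (¬ p x))).foldl f init := by
  rw [← PySem.List.foldl_ite_eq_foldl_filter (fun x => ¬ p x) f l init]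
  exact PySem.List.foldl_congr_mem l _ _ init (fun acc x _ => by by_cases h : p x <;> simp [h])

-- A's dict is the grouping fold over pvPairs.
theorem pv_dict_eq (m : Int) (F R : List (Int × Int)) :
    F.foldl (fun d i =>
      if i.2 > m then d else
      R.foldl (fun d j =>
        if j.2 > m - i.2 then d else
        let totalDist := m - (i.2 + j.2)
        let d := if d.contains totalDist = false then d.insert totalDist [] else d
        d.modify totalDist [] (fun l => l ++ [(i.1, j.1)])) d) PySem.Dict.empty
    = (pvPairs m F R).foldl (fun d p => d.modify p.1 [] (fun l => l ++ [p.2])) PySem.Dict.empty := by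
  unfold pvPairs
  rw [List.foldl_flatMap]
  refine PySem.List.foldl_congr_mem F _ _ _ (fun d f _ => ?_)
  by_cases hf : f.2 ≤ m
  · rw [if_neg (by omega), if_pos hf, List.foldl_map,
      pv_foldl_skip_if (fun j => j.2 > m - f.2) _ R d]
    rw [List.filter_congr (q := fun r => decide (r.2 ≤ m - f.2)) (fun r _ => by rw [decide_eq_decide]; omega)]
    exact PySem.List.foldl_congr_mem _ _ _ d (fun d j _ => pv_step_eq_modify d _ _)
  · rw [if_pos (by omega), if_neg hf, List.foldl_nil]

theorem pv_getD (m : Int) (F R : List (Int × Int)) (k : Int) :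
    ((pvPairs m F R).foldl (fun d p => d.modify p.1 [] (fun l => l ++ [p.2])) PySem.Dict.empty).getD k []
      = ((pvPairs m F R).filter (fun p => p.1 == k)).map (·.2) := by
  rw [PySem.Dict.getD_foldl_modify_append, PySem.Dict.getD_empty]; rfl

theorem pv_keys (m : Int) (F R : List (Int × Int)) :
    ((pvPairs m F R).foldl (fun d p => d.modify p.1 [] (fun l => l ++ [p.2])) PySem.Dict.empty).keys
      = PySem.Set.ofList ((pvPairs m F R).map (·.1)) := by
  rw [PySem.Dict.keys_foldl_modify_key (pvPairs m F R) (·.1) [] (fun _ p => fun l => l ++ [p.2]),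
    PySem.Dict.keys_empty, PySem.Set.update_nil_left]

theorem pv_mem_pairs {m : Int} {F R : List (Int × Int)} {p : Int × (Int × Int)}
    (hp : p ∈ pvPairs m F R) :
    ∃ f ∈ F, ∃ r ∈ R, f.2 ≤ m ∧ r.2 ≤ m - f.2 ∧ p = (m - (f.2 + r.2), (f.1, r.1)) := by
  unfold pvPairs at hp
  rw [List.mem_flatMap] at hp
  obtain ⟨f, hf, hpf⟩ := hp
  by_cases hfm : f.2 ≤ m
  · rw [if_pos hfm, List.mem_map] at hpf
    obtain ⟨r, hr, hpr⟩ := hpf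
    rw [List.mem_filter] at hr
    exact ⟨f, hf, r, hr.1, hfm, by simpa using hr.2, hpr.symm⟩
  · rw [if_neg hfm] at hpf; cases hpf

theorem pv_pairs_nonneg {m : Int} {F R : List (Int × Int)} {p : Int × (Int × Int)}
    (hp : p ∈ pvPairs m F R) : 0 ≤ p.1 := by
  obtain ⟨f, _, r, _, _, hr, hpeq⟩ := pv_mem_pairs hp
  subst hpeq; simp; omega

-- B's running maximum once the accumulator is some.
theorem pv_optmax_some (l : List Int) (x : Int) :
    l.foldl (fun b s => if b = none ∨ b.getD 0 < s then some s else b) (some x)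
      = some (l.foldl max x) := by
  induction l generalizing x with
  | nil => rfl
  | cons y t ih =>
    simp only [List.foldl_cons]
    have : (if (some x : Option Int) = none ∨ (some x).getD 0 < y then some y else some x)
        = some (max x y) := by
      by_cases h : x < y <;> simp [h] <;> omega
    rw [this, ih]

-- B's best-fold equals the running-max fold over the sums of pvPairs.
theorem pv_best_eq (m : Int) (F R : List (Int × Int)) :
    F.foldl (fun b f =>
      R.foldl (fun b r =>
        let s := f.2 + r.2
        if f.2 ≤ m ∧ s ≤ m then
          if b = none ∨ b.getD 0 < s then some s else b
        else b) b) none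
    = ((pvPairs m F R).map (fun p => m - p.1)).foldl
        (fun b s => if b = none ∨ b.getD 0 < s then some s else b) none := by
  unfold pvPairs
  rw [List.map_flatMap, List.foldl_flatMap]
  refine PySem.List.foldl_congr_mem F _ _ _ (fun b f _ => ?_)
  by_cases hf : f.2 ≤ m
  · rw [if_pos hf, List.map_map,
      PySem.List.foldl_ite_eq_foldl_filter (fun r => f.2 ≤ m ∧ f.2 + r.2 ≤ m)
        (fun b r => if b = none ∨ b.getD 0 < f.2 + r.2 then some (f.2 + r.2) else b) R b,
      List.filter_congr (q := fun r => decide (r.2 ≤ m - f.2)) (fun r _ => by rw [decide_eq_decide]; omega), List.foldl_map]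
    refine PySem.List.foldl_congr_mem _ _ _ b (fun b r _ => ?_)
    simp only [Function.comp_apply]
    rw [show m - (m - (f.2 + r.2)) = f.2 + r.2 by omega]
  · rw [if_neg hf]
    simp only [List.map_nil, List.foldl_nil]
    refine Eq.trans (PySem.List.foldl_congr_mem R _ (fun b _ => b) b
      (fun b r _ => by simp [hf])) (by simp)

-- B's gathering comprehension is A's bucket at key k (for 0 ≤ k).
theorem pv_gather (m : Int) (F R : List (Int × Int)) (k : Int) (hk0 : 0 ≤ k) :
    F.flatMap (fun f => (R.filter (fun r => decide (f.2 ≤ m ∧ f.2 + r.2 = m - k))).map (fun r => (f.1, r.1)))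
      = ((pvPairs m F R).filter (fun p => p.1 == k)).map (·.2) := by
  unfold pvPairs
  rw [List.filter_flatMap, List.map_flatMap]
  refine List.flatMap_congr (fun f _ => ?_)
  by_cases hfm : f.2 ≤ m
  · rw [if_pos hfm, List.filter_map, List.filter_filter, List.map_map]
    rw [List.filter_congr (fun r _ => ?_)]
    · rfl
    · show decide (f.2 ≤ m ∧ f.2 + r.2 = m - k)
        = ((m - (f.2 + r.2) == k) && decide (r.2 ≤ m - f.2))
      rw [Bool.beq_eq_decide_eq, ← Bool.decide_and, decide_eq_decide]
      omega
  · rw [if_neg hfm]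
    simp [hfm]

-- ===== VERDICT (by name: the statement is the Claim_ definition above) =====
theorem OptimizedAir1_spec : Claim_equal_OptimizedAir1 := by
  intro m F R _
  unfold Spec_OptimizedAir1 OptimizedAir1 OptimizedAir1_alt
  simp only [pv_dict_eq, pv_best_eq, pv_keys]
  rcases hP : pvPairs m F R with _ | ⟨q, qs⟩
  · rfl
  · rw [← hP]
    -- the sorted key list is nonempty; its head k is the least key, and 0 ≤ k
    have hset : q.1 ∈ PySem.Set.ofList ((pvPairs m F R).map (·.1)) := by
      rw [PySem.Set.mem_ofList]
      exact List.mem_map_of_mem (by rw [hP]; exact List.mem_cons_self)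
    have hne : PySem.List.sorted (PySem.Set.ofList ((pvPairs m F R).map (·.1))) (fun x => x) false ≠ [] := by
      intro hnil
      rw [PySem.List.sorted_eq_nil_iff] at hnil
      rw [hnil] at hset; cases hset
    obtain ⟨k, t, hSK⟩ := List.exists_cons_of_ne_nil hne
    have hkmem : k ∈ (pvPairs m F R).map (·.1) := by
      have hmem : k ∈ PySem.List.sorted (PySem.Set.ofList ((pvPairs m F R).map (·.1))) (fun x => x) false := by
        rw [hSK]; exact List.mem_cons_self
      rw [PySem.List.mem_sorted, PySem.Set.mem_ofList] at hmem
      exact hmem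
    obtain ⟨p0, hp0, hp0k⟩ := List.mem_map.mp hkmem
    have hk0 : 0 ≤ k := hp0k ▸ pv_pairs_nonneg hp0
    have hkmin : ∀ p ∈ pvPairs m F R, k ≤ p.1 := by
      intro p hp
      refine PySem.List.key_head_sorted_le _ (fun x => x) hSK p.1 ?_
      rw [PySem.Set.mem_ofList]
      exact List.mem_map_of_mem hp
    -- B's best value is m - k
    have hMub : ∀ p ∈ pvPairs m F R, m - p.1 ≤ (qs.map (fun p => m - p.1)).foldl max (m - q.1) := by
      intro p hp
      rw [hP] at hp
      rcases List.mem_cons.mp hp with h | h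
      · subst h; exact (PySem.List.le_foldl_max _ _).1
      · exact (PySem.List.le_foldl_max _ _).2 _ (List.mem_map_of_mem h)
    have hMmem : ∃ p ∈ pvPairs m F R, (qs.map (fun p => m - p.1)).foldl max (m - q.1) = m - p.1 := by
      rcases PySem.List.foldl_max_mem (qs.map (fun p => m - p.1)) (m - q.1) with h | h
      · exact ⟨q, by rw [hP]; exact List.mem_cons_self, h⟩
      · obtain ⟨p, hp, hpe⟩ := List.mem_map.mp h
        exact ⟨p, by rw [hP]; exact List.mem_cons.mpr (Or.inr hp), hpe.symm⟩
    have hMk : (qs.map (fun p => m - p.1)).foldl max (m - q.1) = m - k := by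
      obtain ⟨p, hp, hpe⟩ := hMmem
      have h1 := hkmin p hp
      have h2 := hMub p0 hp0
      rw [hp0k] at h2
      omega
    -- evaluate A's side: bucket of the least (nonnegative) key k
    rw [hSK]
    simp only [pvFirstBucket]
    rw [if_neg (by omega : ¬ k < 0), pv_getD]
    -- evaluate B's side: best = some (m - k), then the gather
    conv_rhs => rw [hP, List.map_cons, List.foldl_cons]
    rw [if_pos (Or.inl rfl), pv_optmax_some, hMk]
    simp only []
    rw [pv_gather m F R k hk0]
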